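-- pv_equiv track=rewrite | github.com/yrribeiro/undergraduation-usage | graph-theory/pancake_flipping.py | pancake_flipping
-- ===== SOURCE A (Python) =====
-- def flip(A, k):
--     start = 0
--     while start < k:
--         A[start], A[k] = A[k], A[start]
--         k -= 1
--         start += 1
--
-- def pancake_flipping(A):
--     n = len(A)
--     all_flips = []
--     while n > 1:
--         max_index = A.index(max(A[:n]))
--         flip(A, max_index)
--         flip(A, n-1)
--         all_flips.append(max_index)
--         all_flips.append(n-1)
--         n -= 1
--     return all_flips
-- ===== SOURCE B (Python) =====
-- # Pancake sort flip sequence, computed recursively on immutable slices: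
-- # bring the max to the front conceptually by building the remaining list as
-- # reversed-tail + head-part, instead of performing in-place swap flips.
-- def pancake_flipping(A):
--     n = len(A)
--     if n <= 1:
--         return []
--     m = max(range(n), key=A.__getitem__)
--     rest = A[m + 1:][::-1] + A[:m]
--     return [m, n - 1] + pancake_flipping(rest)
-- ===== Notes on version B (the rewrite author's own statement) =====
-- stated objective: alternative
-- what changed: B computes the flip sequence by pure structural recursion on list slices (reversed tail + head prefix forms the next subproblem) with a one-pass argmax, instead of A's imperative while-loop with two in-place swap-loop flips per round; B does not mutate its argument (A leaves it sorted), the claim is about the return value.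
import Mathlib
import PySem

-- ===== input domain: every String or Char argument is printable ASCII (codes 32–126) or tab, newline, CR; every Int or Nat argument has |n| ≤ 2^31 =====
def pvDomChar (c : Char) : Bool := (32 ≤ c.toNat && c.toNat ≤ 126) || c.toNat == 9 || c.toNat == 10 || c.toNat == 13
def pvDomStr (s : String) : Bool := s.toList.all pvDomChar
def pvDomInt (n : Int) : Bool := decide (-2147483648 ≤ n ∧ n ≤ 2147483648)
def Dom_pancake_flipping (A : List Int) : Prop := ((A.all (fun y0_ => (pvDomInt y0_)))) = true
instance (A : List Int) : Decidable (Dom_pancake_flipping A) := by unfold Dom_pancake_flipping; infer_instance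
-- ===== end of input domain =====

-- B computes the flip sequence by pure recursion on list slices (reversed tail ++ head prefix)
-- with a one-pass argmax, instead of A's in-place swap-loop flips; A mutates its argument into
-- sorted order while B is pure — the equivalence proved here is about the RETURN value only.

-- ===== PORT A =====
-- while start < k: swap A[start],A[k]; k -= 1; start += 1   (pyGet? none = IndexError, unreachable from pancake_flipping)
def pvFlipLoop (A : List Int) (start k : Int) : List Int :=
  if start < k then
    match PySem.List.pyGet? A start, PySem.List.pyGet? A k with
    | some vs, some vk =>
        pvFlipLoop (PySem.List.pySetD (PySem.List.pySetD A start vk) k vs) (start + 1) (k - 1)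
    | _, _ => A
  else A
termination_by (k - start).toNat
decreasing_by omega

def pvPanLoop (A : List Int) (n : Nat) (acc : List Int) : List Int :=
  if 1 < n then
    match PySem.List.max? (PySem.List.slice A none (some (n : Int))) (fun y => y) with
    | some mx =>
      match PySem.List.index? A mx with
      | some mi =>
          pvPanLoop (pvFlipLoop (pvFlipLoop A 0 (mi : Int)) 0 ((n : Int) - 1)) (n - 1)
            (acc ++ [(mi : Int), (n : Int) - 1])
      | none => acc  -- ValueError in Python; unreachable: mx ∈ A
    | none => acc    -- ValueError in Python; unreachable: the slice is nonempty when called from below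
  else acc

def pancake_flipping (A : List Int) : List Int := pvPanLoop A A.length []

-- ===== PORT B =====
-- m = max(range(n), key=A.__getitem__): one left-to-right pass keeping the first maximal index
-- (A[0] would be out of range only for n = 0, unreachable: the caller returns [] for n <= 1;
--  totalised with pyGetD)
def pvArgmax (xs : List Int) : Int :=
  ((PySem.List.enumerate xs 0).foldl (fun acc p => if acc.2 < p.2 then p else acc)
      (0, PySem.List.pyGetD xs 0 0)).1

-- the recursion of Source B, totalised with fuel (each call strictly shortens the list, so
-- fuel = initial length always suffices; proved in pvLoop_go below)
def pvGoFuel : Nat → List Int → List Int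
  | 0, _ => []
  | fuel + 1, xs =>
    if xs.length ≤ 1 then []
    else
      let m := pvArgmax xs
      let rest := (PySem.List.slice xs (some (m + 1)) none).reverse ++
                  PySem.List.slice xs none (some m)
      [m, (xs.length : Int) - 1] ++ pvGoFuel fuel rest

def pancake_flipping_alt (A : List Int) : List Int := pvGoFuel A.length A

-- ===== PRECONDITION & SPEC =====
def Spec_pancake_flipping (A : List Int) (out : List Int) : Prop := out = pancake_flipping_alt A
instance (A : List Int) (out : List Int) : Decidable (Spec_pancake_flipping A out) := by unfold Spec_pancake_flipping; infer_instance

-- ===== CLAIM (what is proved, stated in full; the proofs are below) =====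
def Claim_equal_pancake_flipping : Prop := ∀ (A : List Int), Dom_pancake_flipping A → Spec_pancake_flipping A (pancake_flipping A)

-- ===== LEMMAS AND PROOFS =====

-- "first index of the maximum" characterisation shared by the two programs
def pvFirstMax (xs : List Int) (i : Nat) : Prop :=
  ∃ hi : i < xs.length,
    (∀ j (hj : j < xs.length), xs[j] ≤ xs[i]) ∧ (∀ j (hj : j < i), xs[j]'(by omega) < xs[i])

theorem pvFirstMax_unique {xs : List Int} {i i' : Nat}
    (h : pvFirstMax xs i) (h' : pvFirstMax xs i') : i = i' := by
  obtain ⟨hi, hmax, hlt⟩ := h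
  obtain ⟨hi', hmax', hlt'⟩ := h'
  by_contra hne
  rcases Nat.lt_or_ge i i' with hlt2 | hge
  · exact absurd (hmax i' hi') (not_le.mpr (hlt' i hlt2))
  · have : i' < i := by omega
    exact absurd (hmax' i hi) (not_le.mpr (hlt i' this))

theorem pvArgmax_fold_bounds (l : List (Int × Int)) (N : Int) :
    ∀ acc : Int × Int, 0 ≤ acc.1 → acc.1 < N → (∀ p ∈ l, 0 ≤ p.1 ∧ p.1 < N) →
      0 ≤ (l.foldl (fun acc p => if acc.2 < p.2 then p else acc) acc).1 ∧
      (l.foldl (fun acc p => if acc.2 < p.2 then p else acc) acc).1 < N := by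
  induction l with
  | nil => intro acc h0 h1 _; exact ⟨h0, h1⟩
  | cons p t ih =>
      intro acc h0 h1 hm
      simp only [List.foldl_cons]
      by_cases h : acc.2 < p.2
      · simp only [if_pos h]
        exact ih p (hm p (List.mem_cons_self ..)).1 (hm p (List.mem_cons_self ..)).2
          (fun q hq => hm q (List.mem_cons_of_mem _ hq))
      · simp only [if_neg h]
        exact ih acc h0 h1 (fun q hq => hm q (List.mem_cons_of_mem _ hq))

theorem pvArgmax_bounds (xs : List Int) (h : xs ≠ []) :
    0 ≤ pvArgmax xs ∧ pvArgmax xs < (xs.length : Int) := by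
  unfold pvArgmax
  apply pvArgmax_fold_bounds
  · exact le_refl 0
  · show (0:Int) < xs.length
    exact_mod_cast List.length_pos_iff.mpr h
  · intro p hp
    rw [PySem.List.mem_enumerate_iff] at hp
    obtain ⟨k, hk, rfl⟩ := hp
    constructor <;> simp <;> omega

theorem pvArgmax_fold_inv (xs : List Int) :
    ∀ (t : List Int) (d : Nat) (acc : Int × Int), t = xs.drop d →
      (∃ i : Nat, ∃ hi : i < xs.length, acc = ((i : Int), xs[i]) ∧
        (∀ j (hj : j < d) (hj2 : j < xs.length), xs[j] ≤ xs[i]) ∧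
        (∀ j (hj : j < i), xs[j]'(by omega) < xs[i])) →
      (∃ i : Nat, ∃ hi : i < xs.length,
        ((PySem.List.enumerate t (d : Int)).foldl
            (fun acc p => if acc.2 < p.2 then p else acc) acc) = ((i : Int), xs[i]) ∧
        (∀ j (hj : j < xs.length), xs[j] ≤ xs[i]) ∧
        (∀ j (hj : j < i), xs[j]'(by omega) < xs[i])) := by
  intro t
  induction t with
  | nil =>
      intro d acc ht hinv
      obtain ⟨i, hi, hacc, hle, hlt⟩ := hinv
      have hd : xs.length ≤ d := by
        by_contra hc
        have := List.drop_eq_nil_iff.mp ht.symm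
        omega
      exact ⟨i, hi, by simpa [PySem.List.enumerate_nil] using hacc,
        fun j hj => hle j (by omega) hj, hlt⟩
  | cons v t' ih =>
      intro d acc ht hinv
      have hd : d < xs.length := by
        by_contra hc
        rw [List.drop_eq_nil_iff.mpr (by omega)] at ht
        simp at ht
      have hv : xs[d] = v := by
        have h0 : (xs.drop d)[0]'(by simp [← ht]) = v := by simp [← ht]
        simpa using h0
      have ht' : t' = xs.drop (d + 1) := by
        have := congrArg List.tail ht
        simpa [List.tail_drop] using this
      obtain ⟨i, hi, hacc, hle, hlt⟩ := hinv
      rw [PySem.List.enumerate_cons, List.foldl_cons]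
      by_cases hcmp : acc.2 < v
      · rw [if_pos hcmp]
        have hacc2 : acc.2 = xs[i] := by rw [hacc]
        have hpush : ((d : Int) + 1) = ((d + 1 : Nat) : Int) := by push_cast; ring
        rw [hpush]
        apply ih (d + 1) _ ht'
        refine ⟨d, hd, by simp [hv], ?_, ?_⟩
        · intro j hj hj2
          rcases Nat.lt_or_ge j d with h | h
          · exact le_of_lt (lt_of_le_of_lt (hle j h hj2) (by rw [← hacc2, hv]; exact hcmp))
          · have : j = d := by omega
            subst this; rfl
        · intro j hj
          exact lt_of_le_of_lt (hle j hj (by omega)) (by rw [← hacc2, hv]; exact hcmp)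
      · rw [if_neg hcmp]
        have hacc2 : acc.2 = xs[i] := by rw [hacc]
        have hpush : ((d : Int) + 1) = ((d + 1 : Nat) : Int) := by push_cast; ring
        rw [hpush]
        apply ih (d + 1) _ ht'
        refine ⟨i, hi, hacc, ?_, hlt⟩
        intro j hj hj2
        rcases Nat.lt_or_ge j d with h | h
        · exact hle j h hj2
        · have : j = d := by omega
          subst this
          rw [hv, ← hacc2]
          omega

theorem pvArgmax_spec (xs : List Int) (h : xs ≠ []) :
    pvFirstMax xs (pvArgmax xs).toNat := by
  have h0 : 0 < xs.length := List.length_pos_iff.mpr h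
  have hinit : PySem.List.pyGetD xs 0 0 = xs[0] := by
    have := PySem.List.pyGetD_eq_getElem (xs := xs) (i := 0) (d := 0) (by omega)
      (by exact_mod_cast h0)
    simpa using this
  have := pvArgmax_fold_inv xs xs 0 (0, PySem.List.pyGetD xs 0 0) (by simp)
    ⟨0, h0, by simp [hinit], by omega, by omega⟩
  obtain ⟨i, hi, heq, hle, hlt⟩ := this
  have hax : pvArgmax xs = (i : Int) := by
    unfold pvArgmax
    rw [show ((0:Int)) = ((0:Nat) : Int) by norm_num] at heq ⊢
    rw [heq]
  rw [hax]
  simpa using ⟨hi, hle, hlt⟩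

-- flip reverses the segment starting at pre.length
theorem pvFlip_seg : ∀ (n : Nat) (mid pre suf : List Int), mid.length = n →
    pvFlipLoop (pre ++ mid ++ suf) (pre.length : Int) ((pre.length : Int) + (mid.length : Int) - 1)
      = pre ++ mid.reverse ++ suf := by
  intro n
  induction n using Nat.strong_induction_on with
  | _ n ih =>
    intro mid pre suf hlen
    by_cases h2 : mid.length ≤ 1
    · rw [pvFlipLoop, if_neg (by omega)]
      rcases mid with _ | ⟨x, _ | ⟨y, t⟩⟩
      · rfl
      · rfl
      · simp at h2
    · -- mid has length ≥ 2 : mid = x :: m' ++ [y]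
      obtain ⟨x, rest, rfl⟩ : ∃ x rest, mid = x :: rest := by
        cases mid with
        | nil => simp at h2
        | cons a b => exact ⟨a, b, rfl⟩
      obtain ⟨m', y, rfl⟩ : ∃ m' y, rest = m' ++ [y] := by
        rcases List.eq_nil_or_concat rest with hnil | ⟨m', y, hc⟩
        · subst hnil; simp at h2
        · exact ⟨m', y, by simpa using hc⟩
      simp only [List.length_cons, List.length_append, List.length_cons, List.length_nil] at hlen h2
      rw [pvFlipLoop, if_pos (by simp only [List.length_cons, List.length_append, List.length_nil]; push_cast; omega)]
      -- the two reads
      have e1 : pre ++ (x :: (m' ++ [y])) ++ suf = pre ++ x :: ((m' ++ [y]) ++ suf) := by simp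
      have hget1 : PySem.List.pyGet? (pre ++ (x :: (m' ++ [y])) ++ suf) (pre.length : Int)
          = some x := by
        rw [e1]; exact PySem.List.pyGet?_append_length pre _ x
      have e2 : pre ++ (x :: (m' ++ [y])) ++ suf = (pre ++ x :: m') ++ y :: suf := by simp
      have hk : (pre.length : Int) + ((x :: (m' ++ [y])).length : Int) - 1
          = (((pre ++ x :: m').length : Nat) : Int) := by
        simp only [List.length_cons, List.length_append, List.length_cons, List.length_nil]
        push_cast; ring
      have hget2 : PySem.List.pyGet? (pre ++ (x :: (m' ++ [y])) ++ suf)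
          ((pre.length : Int) + ((x :: (m' ++ [y])).length : Int) - 1) = some y := by
        rw [hk, e2]; exact PySem.List.pyGet?_append_length (pre ++ x :: m') _ y
      rw [hget1, hget2]
      dsimp only
      -- the two writes
      have hset1 : PySem.List.pySetD (pre ++ (x :: (m' ++ [y])) ++ suf) (pre.length : Int) y
          = pre ++ (y :: (m' ++ [y])) ++ suf := by
        rw [PySem.List.pySetD_natCast]
        rw [List.append_assoc, List.set_append, if_neg (by omega)]
        simp [List.append_assoc]
      have hset2 : PySem.List.pySetD (pre ++ (y :: (m' ++ [y])) ++ suf)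
          ((pre.length : Int) + ((x :: (m' ++ [y])).length : Int) - 1) x
          = pre ++ (y :: (m' ++ [x])) ++ suf := by
        rw [hk, PySem.List.pySetD_natCast]
        have e3 : pre ++ (y :: (m' ++ [y])) ++ suf = (pre ++ y :: m') ++ y :: suf := by simp
        rw [e3, List.set_append,
          if_neg (by simp only [List.length_append, List.length_cons]; omega)]
        have : (pre ++ x :: m').length - (pre ++ y :: m').length = 0 := by simp
        rw [this]
        simp [List.append_assoc]
      rw [hset1, hset2]
      -- recursive call via ih on m'
      have hstart : (pre.length : Int) + 1 = (((pre ++ [y]).length : Nat) : Int) := by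
        simp only [List.length_append, List.length_cons, List.length_nil]
        push_cast; ring
      have hk2 : (pre.length : Int) + ((x :: (m' ++ [y])).length : Int) - 1 - 1
          = (((pre ++ [y]).length : Nat) : Int) + ((m'.length : Nat) : Int) - 1 := by
        simp only [List.length_cons, List.length_append, List.length_cons, List.length_nil]
        push_cast; ring
      have e4 : pre ++ (y :: (m' ++ [x])) ++ suf = (pre ++ [y]) ++ m' ++ ([x] ++ suf) := by
        simp
      rw [hstart, hk2, e4, ih m'.length (by omega) m' (pre ++ [y]) ([x] ++ suf) rfl]
      simp

theorem pvFlip_spec (A : List Int) (m : Nat) (hm : m < A.length) :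
    pvFlipLoop A 0 (m : Int) = (A.take (m + 1)).reverse ++ A.drop (m + 1) := by
  have hlen : (A.take (m + 1)).length = m + 1 := by simp; omega
  have h := pvFlip_seg (m + 1) (A.take (m + 1)) [] (A.drop (m + 1)) hlen
  simp only [List.nil_append, List.length_nil, hlen, Nat.cast_zero] at h
  rw [List.take_append_drop] at h
  have hcast : (m : Int) = 0 + ((m + 1 : Nat) : Int) - 1 := by push_cast; ring
  rw [hcast]
  exact h

theorem pvLoop_go : ∀ (n : Nat) (A acc : List Int) (fuel : Nat), n ≤ A.length → n ≤ fuel + 1 →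
    pvPanLoop A n acc = acc ++ pvGoFuel fuel (A.take n) := by
  intro n
  induction n using Nat.strong_induction_on with
  | _ n ih =>
    intro A acc fuel hn hf
    by_cases h1 : 1 < n
    case neg =>
      rw [pvPanLoop, if_neg h1]
      cases fuel with
      | zero => simp [pvGoFuel]
      | succ f =>
          rw [pvGoFuel, if_pos (by simp; omega)]
          simp
    case pos =>
      obtain ⟨f, rfl⟩ : ∃ f, fuel = f + 1 := ⟨fuel - 1, by omega⟩
      have hxslen : (A.take n).length = n := by simp; omega
      have hslice : PySem.List.slice A none (some (n : Int)) = A.take n :=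
        PySem.List.slice_to_natCast A n
      rw [pvPanLoop, if_pos h1, hslice]
      have hxsne : A.take n ≠ [] := by
        intro hc; rw [hc] at hxslen; simp at hxslen; omega
      cases hmx : PySem.List.max? (A.take n) (fun y => y) with
      | none => exact absurd ((PySem.List.max?_eq_none_iff _ _).mp hmx) hxsne
      | some mx =>
        dsimp only
        have hmem : mx ∈ A.take n := PySem.List.max?_mem hmx
        have hmemA : mx ∈ A := List.mem_of_mem_take hmem
        cases hmi : PySem.List.index? A mx with
        | none => exact absurd hmemA ((PySem.List.index?_eq_none_iff _ _).mp hmi)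
        | some mi =>
          dsimp only
          obtain ⟨hmiA, hAmi, hfirst⟩ := PySem.List.getElem_of_index?_eq_some hmi
          obtain ⟨j, hj, hjv⟩ := List.getElem_of_mem hmem
          have hjlt : j < n := by omega
          have hjA : A[j]'(by omega) = mx := by
            rw [← hjv]; exact (List.getElem_take).symm
          have hmin : mi < n := by
            by_contra hc
            exact hfirst j (by omega) hjA
          -- first-max characterisation of mi on the prefix
          have hxsmi : (A.take n)[mi]'(by omega) = mx := by
            rw [List.getElem_take]; exact hAmi
          have hPA : pvFirstMax (A.take n) mi := by
            refine ⟨by omega, ?_, ?_⟩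
            · intro k hk
              rw [hxsmi]
              exact PySem.List.max?_isMax hmx _ (List.getElem_mem _)
            · intro k hk
              rw [hxsmi]
              have hkn : k < n := by omega
              have h1k : (A.take n)[k]'(by omega) = A[k]'(by omega) := List.getElem_take
              rw [h1k]
              have hne : A[k]'(by omega) ≠ mx := hfirst k (by omega)
              have hle : A[k]'(by omega) ≤ mx := by
                rw [← h1k]
                exact PySem.List.max?_isMax hmx _ (List.getElem_mem _)
              omega
          -- B side: argmax of the prefix is mi
          have hB := pvArgmax_spec (A.take n) hxsne
          have hEqN : (pvArgmax (A.take n)).toNat = mi := pvFirstMax_unique hB hPA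
          have hb0 := (pvArgmax_bounds (A.take n) hxsne).1
          have hm : pvArgmax (A.take n) = (mi : Int) := by omega
          -- unfold pvGoFuel on the prefix
          rw [pvGoFuel, if_neg (by omega)]
          simp only [hm]
          have hr1 : PySem.List.slice (A.take n) (some ((mi : Int) + 1)) none
              = (A.take n).drop (mi + 1) := by
            rw [show ((mi : Int) + 1) = ((mi + 1 : Nat) : Int) by push_cast; ring]
            rw [PySem.List.slice_from _ (by positivity)]
            simp
          have hr2 : PySem.List.slice (A.take n) none (some (mi : Int)) = (A.take n).take mi := by
            rw [PySem.List.slice_to _ (by positivity)]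
            simp
          have hrest : ((A.take n).drop (mi + 1)).reverse ++ (A.take n).take mi
              = ((A.drop (mi + 1)).take (n - (mi + 1))).reverse ++ A.take mi := by
            rw [List.drop_take, List.take_take, show min mi n = mi by omega]
          rw [hr1, hr2, hrest]
          -- A side: the two flips
          have hF1 : pvFlipLoop A 0 (mi : Int)
              = (A.take (mi + 1)).reverse ++ A.drop (mi + 1) := pvFlip_spec A mi (by omega)
          have hF1len : (pvFlipLoop A 0 (mi : Int)).length = A.length := by
            rw [hF1]; simp; omega
          have hn1 : ((n : Int) - 1) = ((n - 1 : Nat) : Int) := by push_cast; omega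
          have hF2 : pvFlipLoop (pvFlipLoop A 0 (mi : Int)) 0 ((n : Int) - 1)
              = ((pvFlipLoop A 0 (mi : Int)).take n).reverse
                ++ (pvFlipLoop A 0 (mi : Int)).drop n := by
            rw [hn1, pvFlip_spec _ (n - 1) (by omega)]
            rw [show n - 1 + 1 = n by omega]
          -- explicit form of the array after the two flips
          have hTlen : (A.take (mi + 1)).length = mi + 1 := by simp; omega
          have htake : (pvFlipLoop A 0 (mi : Int)).take n
              = (A.take (mi + 1)).reverse ++ (A.drop (mi + 1)).take (n - (mi + 1)) := by
            rw [hF1, List.take_append]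
            rw [List.take_of_length_le (l := (A.take (mi + 1)).reverse) (by simp [hTlen]; omega)]
            rw [List.length_reverse, hTlen]
          have hdrop : (pvFlipLoop A 0 (mi : Int)).drop n
              = (A.drop (mi + 1)).drop (n - (mi + 1)) := by
            rw [hF1, List.drop_append]
            rw [List.drop_of_length_le (l := (A.take (mi + 1)).reverse) (by simp [hTlen]; omega)]
            rw [List.length_reverse, hTlen]
            simp
          have hA2 : pvFlipLoop (pvFlipLoop A 0 (mi : Int)) 0 ((n : Int) - 1)
              = ((A.drop (mi + 1)).take (n - (mi + 1))).reverse
                ++ (A.take (mi + 1) ++ (A.drop (mi + 1)).drop (n - (mi + 1))) := by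
            rw [hF2, htake, hdrop, List.reverse_append, List.reverse_reverse, List.append_assoc]
          have hrevlen : (((A.drop (mi + 1)).take (n - (mi + 1))).reverse).length
              = n - (mi + 1) := by
            simp; omega
          have hA2take : (pvFlipLoop (pvFlipLoop A 0 (mi : Int)) 0 ((n : Int) - 1)).take (n - 1)
              = ((A.drop (mi + 1)).take (n - (mi + 1))).reverse ++ A.take mi := by
            rw [hA2, List.take_append]
            rw [List.take_of_length_le
              (l := ((A.drop (mi + 1)).take (n - (mi + 1))).reverse) (i := n - 1)
              (by rw [hrevlen]; omega)]
            rw [hrevlen, show n - 1 - (n - (mi + 1)) = mi by omega]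
            rw [List.take_append, List.take_take, show min mi (mi + 1) = mi by omega]
            rw [hTlen, show mi - (mi + 1) = 0 by omega, List.take_zero, List.append_nil]
          have hA2len : (pvFlipLoop (pvFlipLoop A 0 (mi : Int)) 0 ((n : Int) - 1)).length
              = A.length := by
            rw [hF2]
            simp only [List.length_append, List.length_reverse, List.length_take,
              List.length_drop, hF1len]
            omega
          -- recursion
          rw [ih (n - 1) (by omega) _ (acc ++ [(mi : Int), (n : Int) - 1]) f (by omega)
            (by omega), hA2take]
          rw [hxslen]
          simp [List.append_assoc]

-- ===== VERDICT (by name: the statement is the Claim_ definition above) =====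
theorem pancake_flipping_spec : Claim_equal_pancake_flipping := by
  intro A _
  unfold Spec_pancake_flipping pancake_flipping pancake_flipping_alt
  have := pvLoop_go A.length A [] A.length (le_refl _) (by omega)
  simpa using this
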